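-- pv_equiv track=rewrite | github.com/MartinDvorak/IP1 | set_greedy.py | click_from_first
-- ===== SOURCE A (Python) =====
-- def remove_state(click,states):
--
-- 	for state in click:
-- 		states.remove(state)
-- 	return states
--
-- def click_append(state, click, trans):
--
-- 	if not click:
-- 		click.append(state)
-- 		return click
-- 	for item in click:
-- 		if((((state,item)) in trans) or ((item,state) in trans)):
-- 			return click
--
-- 	click.append(state)
-- 	return click
--
-- def click_from_first(states, trans):
-- 	arr_click = []
--
--
-- 	while states:
-- 		click = []
-- 		for state in states:
-- 			click = click_append(state,click,trans)
--
-- 		arr_click.append(click)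
-- 		states = remove_state(click,states)
--
-- 	return arr_click
-- ===== SOURCE B (Python) =====
-- def click_from_first(states, trans):
--     # First-fit in one forward pass; drains the caller's `states` list like the original.
--     groups = []
--     for state in list(states):
--         for g in groups:
--             if all((state, x) not in trans and (x, state) not in trans for x in g):
--                 g.append(state)
--                 break
--         else:
--             groups.append([state])
--     states.clear()
--     return groups
-- ===== Notes on version B (the rewrite author's own statement) =====
-- stated objective: simpler
-- what changed: Replaces A's repeated maximal-clique extraction passes over a shrinking list (with in-place remove) by a single forward first-fit pass that drops each state into the first compatible group.
import Mathlib
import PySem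

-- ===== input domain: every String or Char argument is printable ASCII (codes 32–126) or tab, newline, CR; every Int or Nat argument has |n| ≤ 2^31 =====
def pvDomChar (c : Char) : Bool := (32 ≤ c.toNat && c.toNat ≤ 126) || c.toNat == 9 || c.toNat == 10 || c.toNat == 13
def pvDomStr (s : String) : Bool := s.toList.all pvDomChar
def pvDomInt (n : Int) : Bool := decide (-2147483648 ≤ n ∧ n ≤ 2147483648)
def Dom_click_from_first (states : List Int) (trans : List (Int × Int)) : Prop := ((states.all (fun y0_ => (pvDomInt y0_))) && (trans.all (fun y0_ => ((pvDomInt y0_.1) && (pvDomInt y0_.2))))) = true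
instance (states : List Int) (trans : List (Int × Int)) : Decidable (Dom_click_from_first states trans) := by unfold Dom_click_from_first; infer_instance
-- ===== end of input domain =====

-- B replaces A's repeated maximal-clique passes over the shrinking list by a single
-- forward first-fit pass (objective: simpler). Both Pythons drain the caller's `states`
-- list in place; the equivalence proved here is about the RETURN value.

-- ===== PORT A =====

-- `for item in click: if (state,item) in trans or (item,state) in trans: return click`
def pyClickConflict (trans : List (Int × Int)) (state item : Int) : Bool :=
  trans.contains (state, item) || trans.contains (item, state)

def click_append (state : Int) (click : List Int) (trans : List (Int × Int)) : List Int :=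
  if click = [] then click ++ [state]
  else if click.any (fun item => pyClickConflict trans state item) then click
  else click ++ [state]

-- `for state in click: states.remove(state)`; `.remove` never misses in A's use
-- (every click member is a value of `states`), so the `getD` fallback is unreachable.
def remove_state (click : List Int) (states : List Int) : List Int :=
  click.foldl (fun st x => (PySem.List.remove? st x).getD st) states

-- the `while states:` loop; fuel = states.length suffices since every pass removes
-- at least the first remaining state (proved below, lemma `loopA_fuel` chain).
def loopA (trans : List (Int × Int)) : Nat → List Int → List (List Int) → List (List Int)
  | _, [], arr => arr
  | 0, _ :: _, arr => arr
  | (f+1), s :: ss, arr =>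
      let click := (s :: ss).foldl (fun c st => click_append st c trans) []
      loopA trans f (remove_state click (s :: ss)) (arr ++ [click])

def click_from_first (states : List Int) (trans : List (Int × Int)) : List (List Int) :=
  loopA trans states.length states []

-- ===== PORT B =====

-- `all((state, x) not in trans and (x, state) not in trans for x in g)`
def fitsGroup (trans : List (Int × Int)) (state : Int) (g : List Int) : Bool :=
  g.all (fun x => !(trans.contains (state, x)) && !(trans.contains (x, state)))

-- the inner `for g in groups: … break / else: append new group`
def placeState (trans : List (Int × Int)) (state : Int) : List (List Int) → List (List Int)
  | [] => [[state]]
  | g :: gs =>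
      if fitsGroup trans state g then (g ++ [state]) :: gs
      else g :: placeState trans state gs

def click_from_first_alt (states : List Int) (trans : List (Int × Int)) : List (List Int) :=
  states.foldl (fun groups state => placeState trans state groups) []

-- ===== PRECONDITION & SPEC =====
def Spec_click_from_first (states : List Int) (trans : List (Int × Int)) (out : List (List Int)) : Prop := out = click_from_first_alt states trans
instance (states : List Int) (trans : List (Int × Int)) (out : List (List Int)) : Decidable (Spec_click_from_first states trans out) := by unfold Spec_click_from_first; infer_instance

-- ===== CLAIM (what is proved, stated in full; the proofs are below) =====
def Claim_equal_click_from_first : Prop := ∀ (states : List Int) (trans : List (Int × Int)), Dom_click_from_first states trans → Spec_click_from_first states trans (click_from_first states trans)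

-- ===== LEMMAS AND PROOFS =====

-- Proof-side view of one pass: split the remaining states (given current click c)
-- into (added-to-click, skipped) in traversal order.
def splitPass (trans : List (Int × Int)) : List Int → List Int → List Int × List Int
  | _, [] => ([], [])
  | c, s :: ss =>
      if c.any (fun item => pyClickConflict trans s item) then
        let p := splitPass trans c ss; (p.1, s :: p.2)
      else
        let p := splitPass trans (c ++ [s]) ss; (s :: p.1, p.2)

theorem click_append_eq (state : Int) (click : List Int) (trans : List (Int × Int)) :
    click_append state click trans =
      if click.any (fun item => pyClickConflict trans state item) then click
      else click ++ [state] := by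
  cases click <;> simp [click_append]

theorem foldl_click_append_eq_split (trans : List (Int × Int)) :
    ∀ (states c : List Int),
      states.foldl (fun cc st => click_append st cc trans) c = c ++ (splitPass trans c states).1 := by
  intro states
  induction states with
  | nil => intro c; simp [splitPass]
  | cons s ss ih =>
      intro c
      rw [List.foldl_cons, click_append_eq]
      by_cases h : c.any (fun item => pyClickConflict trans s item)
      · rw [if_pos h, ih c]
        simp [splitPass, h]
      · rw [if_neg h, ih (c ++ [s])]
        simp [splitPass, h]

-- every value added after the current click c got checked against a superset of c
theorem splitPass_added_compat (trans : List (Int × Int)) :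
    ∀ (ss c : List Int) (x : Int), x ∈ (splitPass trans c ss).1 →
      c.any (fun item => pyClickConflict trans x item) = false := by
  intro ss
  induction ss with
  | nil => intro c x hx; simp [splitPass] at hx
  | cons s ss ih =>
      intro c x hx
      by_cases h : c.any (fun item => pyClickConflict trans s item)
      · simp only [splitPass, h, if_pos] at hx
        exact ih c x hx
      · simp only [splitPass, h, Bool.false_eq_true, if_neg, not_false_iff,
          List.mem_cons] at hx
        rcases hx with rfl | hx2
        · simpa using h
        · have hall := ih (c ++ [s]) x hx2
          rw [List.any_append] at hall
          exact (Bool.or_eq_false_iff.mp hall).1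

theorem remove_state_cons_of_not_mem (s : Int) (ss : List Int) (a : List Int)
    (h : s ∉ a) : remove_state a (s :: ss) = s :: remove_state a ss := by
  induction a generalizing ss with
  | nil => simp [remove_state]
  | cons x xs ih =>
      have hsx : s ≠ x := fun he => h (he ▸ List.mem_cons_self ..)
      have hrem : PySem.List.remove? (s :: ss) x = Option.map (fun t => s :: t) (PySem.List.remove? ss x) :=
        PySem.List.remove?_cons_of_ne ss hsx
      simp only [remove_state, List.foldl_cons] at *
      cases hro : PySem.List.remove? ss x with
      | none =>
          simp only [hrem, hro, Option.map_none, Option.getD_none]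
          exact ih ss (fun hm => h (List.mem_cons_of_mem _ hm))
      | some l =>
          simp only [hrem, hro, Option.map_some, Option.getD_some]
          exact ih l (fun hm => h (List.mem_cons_of_mem _ hm))

theorem remove_state_split (trans : List (Int × Int)) :
    ∀ (states c : List Int),
      remove_state (splitPass trans c states).1 states = (splitPass trans c states).2 := by
  intro states
  induction states with
  | nil => intro c; simp [splitPass, remove_state]
  | cons s ss ih =>
      intro c
      simp only [splitPass]
      by_cases h : c.any (fun item => pyClickConflict trans s item)
      · simp only [h, if_pos]
        have hnm : s ∉ (splitPass trans c ss).1 := by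
          intro hm
          have := splitPass_added_compat trans ss c s hm
          rw [this] at h; exact absurd h (by simp)
        rw [remove_state_cons_of_not_mem s ss _ hnm, ih c]
      · simp only [h, if_neg, Bool.false_eq_true, not_false_iff]
        have : remove_state (s :: (splitPass trans (c ++ [s]) ss).1) (s :: ss)
            = remove_state (splitPass trans (c ++ [s]) ss).1 ss := by
          simp [remove_state, PySem.List.remove?_cons_self]
        rw [this, ih (c ++ [s])]

theorem splitPass_len (trans : List (Int × Int)) :
    ∀ (ss c : List Int), (splitPass trans c ss).2.length ≤ ss.length := by
  intro ss
  induction ss with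
  | nil => intro c; simp [splitPass]
  | cons s ss ih =>
      intro c
      simp only [splitPass]
      by_cases h : c.any (fun item => pyClickConflict trans s item)
      · simp only [h, if_pos, List.length_cons]
        exact Nat.succ_le_succ (ih c)
      · simp only [h, if_neg, Bool.false_eq_true, not_false_iff, List.length_cons]
        exact Nat.le_succ_of_le (ih (c ++ [s]))

theorem fitsGroup_eq (trans : List (Int × Int)) (s : Int) (g : List Int) :
    fitsGroup trans s g = !(g.any (fun item => pyClickConflict trans s item)) := by
  simp [fitsGroup, pyClickConflict, List.all_eq_not_any_not]

-- first-fit decomposition: the head group absorbs exactly A's pass, the skipped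
-- states fall through to the later groups in order
theorem firstfit_split (trans : List (Int × Int)) :
    ∀ (states c : List Int) (gs : List (List Int)),
      states.foldl (fun groups state => placeState trans state groups) (c :: gs)
        = (c ++ (splitPass trans c states).1)
          :: (splitPass trans c states).2.foldl (fun groups state => placeState trans state groups) gs := by
  intro states
  induction states with
  | nil => intro c gs; simp [splitPass]
  | cons s ss ih =>
      intro c gs
      simp only [List.foldl_cons, placeState, fitsGroup_eq, splitPass]
      by_cases h : c.any (fun item => pyClickConflict trans s item)
      · simp only [h, Bool.not_true, Bool.false_eq_true, if_neg, if_pos, not_false_iff]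
        rw [ih c (placeState trans s gs)]
        simp
      · simp only [h, Bool.not_false, if_pos]
        rw [ih (c ++ [s]) gs]
        simp

theorem loopA_acc (trans : List (Int × Int)) :
    ∀ (n : Nat) (states : List Int) (arr : List (List Int)),
      loopA trans n states arr = arr ++ loopA trans n states [] := by
  intro n
  induction n with
  | zero => intro states arr; cases states <;> simp [loopA]
  | succ m ih =>
      intro states arr
      cases states with
      | nil => simp [loopA]
      | cons s ss =>
          simp only [loopA]
          rw [ih _ (arr ++ _), ih _ ([] ++ _)]
          simp

theorem loopA_eq_firstfit (trans : List (Int × Int)) :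
    ∀ (n : Nat) (states : List Int), states.length ≤ n →
      loopA trans n states [] =
        states.foldl (fun groups state => placeState trans state groups) [] := by
  intro n
  induction n with
  | zero =>
      intro states h
      have : states = [] := List.eq_nil_of_length_eq_zero (Nat.le_zero.mp h)
      subst this; simp [loopA]
  | succ m ih =>
      intro states h
      cases states with
      | nil => simp [loopA]
      | cons s ss =>
          have hsplit0 : splitPass trans [] (s :: ss)
              = (s :: (splitPass trans [s] ss).1, (splitPass trans [s] ss).2) := by
            simp [splitPass]
          have hclick : (s :: ss).foldl (fun c st => click_append st c trans) []
              = s :: (splitPass trans [s] ss).1 := by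
            rw [foldl_click_append_eq_split, hsplit0]; simp
          have hrem : remove_state ((s :: ss).foldl (fun c st => click_append st c trans) []) (s :: ss)
              = (splitPass trans [s] ss).2 := by
            rw [hclick]
            have := remove_state_split trans (s :: ss) []
            rw [hsplit0] at this
            exact this
          have hlen : (splitPass trans [s] ss).2.length ≤ m := by
            have := splitPass_len trans ss [s]
            have hm : ss.length ≤ m := Nat.lt_succ_iff.mp (by simpa using h)
            omega
          simp only [loopA]
          rw [hrem, loopA_acc, ih _ hlen]
          have hff : (s :: ss).foldl (fun groups state => placeState trans state groups) []
              = (s :: (splitPass trans [s] ss).1)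
                :: (splitPass trans [s] ss).2.foldl (fun groups state => placeState trans state groups) [] := by
            have h1 : (s :: ss).foldl (fun groups state => placeState trans state groups) []
                = ss.foldl (fun groups state => placeState trans state groups) [[s]] := by
              simp [placeState]
            rw [h1, firstfit_split trans ss [s] []]
            simp
          rw [hff, hclick]
          simp

-- ===== VERDICT (by name: the statement is the Claim_ definition above) =====
theorem click_from_first_spec : Claim_equal_click_from_first := by
  intro states trans _
  unfold Spec_click_from_first click_from_first click_from_first_alt
  exact loopA_eq_firstfit trans states.length states (Nat.le_refl _)
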